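-- pv_equiv track=rewrite | github.com/gdario/coursera_algorithms | course2/programming_assignment_4.py | naive_counter
-- ===== SOURCE A (Python) =====
-- def naive_counter(values, targets):
--     """Naive solution to prob2sum"""
--     visited_targets = {}
--     for i in range(0, len(values)-1):
--         for j in range(i+1, len(values)):
--             tmp = values[i] + values[j]
--             if tmp in targets and tmp not in visited_targets:
--                 visited_targets[tmp] = tmp
--     return len(visited_targets)
-- ===== SOURCE B (Python) =====
-- def naive_counter(values, targets):
--     """2SUM via a count table: one pass builds counts, then each distinct
--     target is checked for a complement pair (self-pairs need count >= 2)."""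
--     counts = {}
--     for v in values:
--         counts[v] = counts.get(v, 0) + 1
--
--     def achievable(t):
--         return any(counts.get(t - x, 0) >= (2 if t - x == x else 1) for x in counts)
--
--     return sum(1 for t in set(targets) if achievable(t))
-- ===== Notes on version B (the rewrite author's own statement) =====
-- stated objective: faster
-- what changed: A enumerates all O(n^2) index pairs and tests each sum against the target list; B builds a value->count table once and, for each distinct target t, checks for some x whether the complement t-x is present (with count >= 2 when t-x == x), the classic hash-based 2SUM check.
import Mathlib
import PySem

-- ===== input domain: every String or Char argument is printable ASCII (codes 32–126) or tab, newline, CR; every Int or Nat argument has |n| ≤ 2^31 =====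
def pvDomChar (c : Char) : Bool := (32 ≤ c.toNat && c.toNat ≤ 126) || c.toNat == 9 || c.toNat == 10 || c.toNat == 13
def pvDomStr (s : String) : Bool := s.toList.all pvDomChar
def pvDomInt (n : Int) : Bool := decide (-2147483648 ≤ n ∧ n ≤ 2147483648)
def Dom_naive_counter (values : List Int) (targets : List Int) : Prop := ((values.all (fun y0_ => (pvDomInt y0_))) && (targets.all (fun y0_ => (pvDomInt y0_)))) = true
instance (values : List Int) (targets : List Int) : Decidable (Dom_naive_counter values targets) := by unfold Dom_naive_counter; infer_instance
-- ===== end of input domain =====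

-- B replaces A's quadratic all-pairs scan by a count table with a per-target complement check (2SUM).

-- ===== PORT A =====
def naive_counter (values : List Int) (targets : List Int) : Int :=
  let d : PySem.Dict Int Int :=
    (PySem.List.pyRange 0 (PySem.List.len values - 1) 1).foldl (fun d i =>
      (PySem.List.pyRange (i + 1) (PySem.List.len values) 1).foldl (fun d j =>
        -- i, j produced by the ranges are always in bounds, so pyGetD is exact for values[i], values[j]
        let tmp := PySem.List.pyGetD values i 0 + PySem.List.pyGetD values j 0
        if targets.contains tmp && !(d.contains tmp) then d.insert tmp tmp else d) d)
      PySem.Dict.empty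
  (d.size : Int)

-- ===== PORT B =====
-- Source B's achievable(t): any(counts.get(t - x, 0) >= (2 if t - x == x else 1) for x in counts)
def pvAchievable (counts : PySem.Dict Int Int) (t : Int) : Bool :=
  counts.keys.any (fun x => decide ((if t - x == x then (2 : Int) else 1) ≤ counts.getD (t - x) 0))

def naive_counter_alt (values : List Int) (targets : List Int) : Int :=
  let counts : PySem.Dict Int Int :=
    values.foldl (fun d v => d.insert v (d.getD v 0 + 1)) PySem.Dict.empty
  ((PySem.Set.ofList targets).countP (fun t => pvAchievable counts t) : Int)

-- ===== PRECONDITION & SPEC =====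
def Spec_naive_counter (values : List Int) (targets : List Int) (out : Int) : Prop := out = naive_counter_alt values targets
instance (values : List Int) (targets : List Int) (out : Int) : Decidable (Spec_naive_counter values targets out) := by unfold Spec_naive_counter; infer_instance

-- ===== CLAIM (what is proved, stated in full; the proofs are below) =====
def Claim_equal_naive_counter : Prop := ∀ (values : List Int) (targets : List Int), Dom_naive_counter values targets → Spec_naive_counter values targets (naive_counter values targets)

-- ===== LEMMAS AND PROOFS =====

-- all pairwise sums values[i] + values[j] with i < j
def pvPairSums : List Int → List Int
  | [] => []
  | x :: xs => xs.map (fun y => x + y) ++ pvPairSums xs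

-- A's inner-loop body (definitionally the port's inline body)
def pvVisit (targets : List Int) (d : PySem.Dict Int Int) (tmp : Int) : PySem.Dict Int Int :=
  if targets.contains tmp && !(d.contains tmp) then d.insert tmp tmp else d

lemma pvPairSums_short (l : List Int) (h : l.length ≤ 1) : pvPairSums l = [] := by
  match l, h with
  | [], _ => rfl
  | [x], _ => rfl

lemma keys_foldl_visit (targets L : List Int) (d : PySem.Dict Int Int) (h : d.keys.Nodup) :
    (L.foldl (pvVisit targets) d).keys.Nodup ∧
    (∀ t, t ∈ (L.foldl (pvVisit targets) d).keys ↔ t ∈ d.keys ∨ (t ∈ targets ∧ t ∈ L)) := by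
  induction L generalizing d with
  | nil => exact ⟨h, fun t => by simp⟩
  | cons a L ih =>
    have hstep : (pvVisit targets d a).keys.Nodup ∧
        (∀ t, t ∈ (pvVisit targets d a).keys ↔ t ∈ d.keys ∨ (t ∈ targets ∧ t = a)) := by
      unfold pvVisit
      by_cases h1 : (targets.contains a && !(d.contains a)) = true
      · rw [if_pos h1]
        simp only [Bool.and_eq_true, Bool.not_eq_true', List.contains_iff_mem] at h1
        refine ⟨PySem.Dict.nodup_keys_insert d a a h, fun t => ?_⟩
        rw [PySem.Dict.mem_keys_insert]
        constructor
        · rintro (rfl | hm)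
          · exact Or.inr ⟨h1.1, rfl⟩
          · exact Or.inl hm
        · rintro (hm | ⟨_, rfl⟩)
          · exact Or.inr hm
          · exact Or.inl rfl
      · rw [if_neg h1]
        refine ⟨h, fun t => ?_⟩
        constructor
        · exact Or.inl
        · rintro (hm | ⟨ht, rfl⟩)
          · exact hm
          · have hc : d.contains t = true := by
              cases hdc : d.contains t with
              | true => rfl
              | false => exact absurd (by simp [ht, hdc]) h1
            exact (PySem.Dict.contains_iff_mem_keys d t).mp hc
    simp only [List.foldl_cons]
    obtain ⟨hn, hmem⟩ := ih (pvVisit targets d a) hstep.1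
    refine ⟨hn, fun t => ?_⟩
    rw [hmem t, hstep.2 t]
    constructor
    · rintro ((hd | ⟨ht, rfl⟩) | ⟨ht, hL⟩)
      · exact Or.inl hd
      · exact Or.inr ⟨ht, List.mem_cons_self ..⟩
      · exact Or.inr ⟨ht, List.mem_cons_of_mem _ hL⟩
    · rintro (hd | ⟨ht, hc⟩)
      · exact Or.inl (Or.inl hd)
      · rcases List.mem_cons.mp hc with rfl | hL
        · exact Or.inl (Or.inr ⟨ht, rfl⟩)
        · exact Or.inr ⟨ht, hL⟩

lemma inner_eq (values targets : List Int) (i : Int) (hi : 0 ≤ i) (d : PySem.Dict Int Int) :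
    (PySem.List.pyRange (i + 1) (PySem.List.len values) 1).foldl
      (fun d j => pvVisit targets d (PySem.List.pyGetD values i 0 + PySem.List.pyGetD values j 0)) d
    = ((values.drop (i + 1).toNat).map (fun y => PySem.List.pyGetD values i 0 + y)).foldl
        (pvVisit targets) d := by
  rw [PySem.List.foldl_pyRange_pyGetD values 0
        (fun d y => pvVisit targets d (PySem.List.pyGetD values i 0 + y)) d (by omega),
      List.foldl_map]

lemma outer_char (values targets : List Int) :
    ∀ (k : Nat) (a : Int), 0 ≤ a → ((PySem.List.len values - 1) - a).toNat = k →
    ∀ (d : PySem.Dict Int Int), d.keys.Nodup →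
    ((PySem.List.pyRange a (PySem.List.len values - 1) 1).foldl (fun d i =>
        (PySem.List.pyRange (i + 1) (PySem.List.len values) 1).foldl
          (fun d j => pvVisit targets d (PySem.List.pyGetD values i 0 + PySem.List.pyGetD values j 0)) d)
        d).keys.Nodup ∧
    (∀ t, t ∈ ((PySem.List.pyRange a (PySem.List.len values - 1) 1).foldl (fun d i =>
        (PySem.List.pyRange (i + 1) (PySem.List.len values) 1).foldl
          (fun d j => pvVisit targets d (PySem.List.pyGetD values i 0 + PySem.List.pyGetD values j 0)) d)
        d).keys ↔ t ∈ d.keys ∨ (t ∈ targets ∧ t ∈ pvPairSums (values.drop a.toNat))) := by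
  intro k
  induction k with
  | zero =>
    intro a ha hk d hd
    have hlen : PySem.List.len values = (values.length : Int) := PySem.List.len_eq values
    rw [PySem.List.pyRange_one_eq_nil (by omega)]
    simp only [List.foldl_nil]
    have hshort : pvPairSums (values.drop a.toNat) = [] := by
      apply pvPairSums_short
      have := List.length_drop (l := values) (i := a.toNat)
      omega
    exact ⟨hd, fun t => by simp [hshort]⟩
  | succ k ih =>
    intro a ha hk d hd
    have hlen : PySem.List.len values = (values.length : Int) := PySem.List.len_eq values
    have halt : a < PySem.List.len values - 1 := by omega
    rw [PySem.List.pyRange_one_cons halt]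
    simp only [List.foldl_cons]
    rw [inner_eq values targets a ha d]
    obtain ⟨hn1, hm1⟩ := keys_foldl_visit targets
      ((values.drop (a + 1).toNat).map (fun y => PySem.List.pyGetD values a 0 + y)) d hd
    obtain ⟨hn2, hm2⟩ := ih (a + 1) (by omega) (by omega) _ hn1
    refine ⟨hn2, fun t => ?_⟩
    rw [hm2 t, hm1 t]
    have hsucc : (a + 1).toNat = a.toNat + 1 := by omega
    have hlt : a.toNat < values.length := by omega
    have hdrop : values.drop a.toNat = values[a.toNat] :: values.drop (a.toNat + 1) :=
      List.drop_eq_getElem_cons hlt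
    have hcv : PySem.List.pyGetD values a 0 = values[a.toNat] :=
      PySem.List.pyGetD_eq_getElem values 0 ha (by omega)
    rw [hdrop]
    simp only [pvPairSums, List.mem_append, hsucc, hcv]
    tauto

lemma pairSums_count_iff (l : List Int) (t : Int) :
    (∃ x ∈ l, (if t - x = x then 2 else 1) ≤ l.count (t - x)) ↔ t ∈ pvPairSums l := by
  induction l with
  | nil => simp [pvPairSums]
  | cons a xs ih =>
    simp only [pvPairSums, List.mem_append, List.mem_map, List.mem_cons]
    constructor
    · rintro ⟨x, hx, hcnt⟩
      rcases hx with h | hx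
      · rw [h] at hcnt
        have hcc : List.count (t - a) (a :: xs)
            = List.count (t - a) xs + if a = t - a then 1 else 0 := by
          simp [List.count_cons]
        have h1 : 1 ≤ xs.count (t - a) := by
          by_cases hy : t - a = a
          · have heq : a = t - a := by omega
            rw [if_pos hy, hcc, if_pos heq] at hcnt
            omega
          · have hne : ¬ (a = t - a) := by omega
            rw [if_neg hy, hcc, if_neg hne] at hcnt
            omega
        exact Or.inl ⟨t - a, List.count_pos_iff.mp (by omega), by omega⟩
      · by_cases hy : t - x = a
        · exact Or.inl ⟨x, hx, by omega⟩
        · refine Or.inr (ih.mp ⟨x, hx, ?_⟩)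
          have hcc : List.count (t - x) (a :: xs)
              = List.count (t - x) xs + if a = t - x then 1 else 0 := by
            simp [List.count_cons]
          have hne : ¬ (a = t - x) := by omega
          rw [hcc, if_neg hne] at hcnt
          simpa using hcnt
    · rintro (⟨y, hy, rfl⟩ | hps)
      · refine ⟨a, Or.inl rfl, ?_⟩
        have hts : a + y - a = y := by omega
        rw [hts]
        have hpos : 0 < xs.count y := List.count_pos_iff.mpr hy
        have hcc : List.count y (a :: xs)
            = List.count y xs + if a = y then 1 else 0 := by
          simp [List.count_cons]
        by_cases h2 : y = a
        · have heq : a = y := by omega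
          rw [if_pos h2, hcc, if_pos heq]
          omega
        · have hne : ¬ (a = y) := by omega
          rw [if_neg h2, hcc, if_neg hne]
          omega
      · obtain ⟨x, hx, hc⟩ := ih.mpr hps
        refine ⟨x, Or.inr hx, ?_⟩
        have hcc : List.count (t - x) (a :: xs)
            = List.count (t - x) xs + if a = t - x then 1 else 0 := by
          simp [List.count_cons]
        by_cases hb : a = t - x
        · rw [hcc, if_pos hb]
          omega
        · rw [hcc, if_neg hb]
          omega

lemma achievable_iff (values : List Int) (t : Int) :
    pvAchievable (values.foldl (fun d v => d.insert v (d.getD v 0 + 1)) PySem.Dict.empty) t = true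
      ↔ t ∈ pvPairSums values := by
  have hkeys : ((values.foldl (fun d v => d.insert v (d.getD v 0 + 1)) PySem.Dict.empty :
      PySem.Dict Int Int)).keys = PySem.Set.ofList values := by
    rw [PySem.Dict.keys_foldl_insert values (fun d v => d.getD v 0 + 1) PySem.Dict.empty,
        PySem.Dict.keys_empty]
    rfl
  have hgetD : ∀ v, (values.foldl (fun d v => d.insert v (d.getD v 0 + 1))
      PySem.Dict.empty).getD v 0 = (values.count v : Int) := by
    intro v
    rw [PySem.Dict.getD_foldl_insert_add_one values PySem.Dict.empty v, PySem.Dict.getD_empty]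
    omega
  rw [← pairSums_count_iff]
  unfold pvAchievable
  simp only [hkeys, hgetD, List.any_eq_true, decide_eq_true_eq, PySem.Set.mem_ofList, beq_iff_eq]
  constructor
  · rintro ⟨x, hx, hle⟩
    refine ⟨x, hx, ?_⟩
    by_cases hy : t - x = x
    · rw [if_pos hy] at hle ⊢; exact_mod_cast hle
    · rw [if_neg hy] at hle ⊢; exact_mod_cast hle
  · rintro ⟨x, hx, hle⟩
    refine ⟨x, hx, ?_⟩
    by_cases hy : t - x = x
    · rw [if_pos hy] at hle ⊢; exact_mod_cast hle
    · rw [if_neg hy] at hle ⊢; exact_mod_cast hle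

-- the equality, phrased over the pvVisit form of A's loop (definitionally A's body)
lemma pv_main (values targets : List Int) :
    ((((PySem.List.pyRange 0 (PySem.List.len values - 1) 1).foldl (fun d i =>
        (PySem.List.pyRange (i + 1) (PySem.List.len values) 1).foldl
          (fun d j => pvVisit targets d (PySem.List.pyGetD values i 0 + PySem.List.pyGetD values j 0)) d)
        PySem.Dict.empty).size : Nat) : Int)
      = naive_counter_alt values targets := by
  obtain ⟨hnd, hmem⟩ := outer_char values targets ((PySem.List.len values - 1 - 0).toNat) 0
    le_rfl rfl PySem.Dict.empty PySem.Dict.nodup_keys_empty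
  simp only [naive_counter_alt]
  rw [List.countP_eq_length_filter]
  have hMnd : ((PySem.Set.ofList targets).filter (fun t =>
      pvAchievable (values.foldl (fun d v => d.insert v (d.getD v 0 + 1)) PySem.Dict.empty) t)).Nodup :=
    List.Nodup.filter _ (PySem.Set.nodup_ofList targets)
  have hperm : (((PySem.List.pyRange 0 (PySem.List.len values - 1) 1).foldl (fun d i =>
        (PySem.List.pyRange (i + 1) (PySem.List.len values) 1).foldl
          (fun d j => pvVisit targets d (PySem.List.pyGetD values i 0 + PySem.List.pyGetD values j 0)) d)
        PySem.Dict.empty).keys).Perm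
      ((PySem.Set.ofList targets).filter (fun t =>
        pvAchievable (values.foldl (fun d v => d.insert v (d.getD v 0 + 1)) PySem.Dict.empty) t)) := by
    rw [List.perm_ext_iff_of_nodup hnd hMnd]
    intro t
    rw [List.mem_filter, hmem t, achievable_iff values t]
    simp only [PySem.Dict.keys_empty, List.not_mem_nil, false_or, Int.toNat_zero,
      List.drop_zero, PySem.Set.mem_ofList]
  have hlen : (((PySem.List.pyRange 0 (PySem.List.len values - 1) 1).foldl (fun d i =>
        (PySem.List.pyRange (i + 1) (PySem.List.len values) 1).foldl
          (fun d j => pvVisit targets d (PySem.List.pyGetD values i 0 + PySem.List.pyGetD values j 0)) d)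
        PySem.Dict.empty).keys).length
      = ((PySem.List.pyRange 0 (PySem.List.len values - 1) 1).foldl (fun d i =>
        (PySem.List.pyRange (i + 1) (PySem.List.len values) 1).foldl
          (fun d j => pvVisit targets d (PySem.List.pyGetD values i 0 + PySem.List.pyGetD values j 0)) d)
        PySem.Dict.empty).size := by
    simp [PySem.Dict.keys, PySem.Dict.size]
  rw [← hlen, hperm.length_eq]

-- ===== VERDICT (by name: the statement is the Claim_ definition above) =====
theorem naive_counter_spec : Claim_equal_naive_counter := by
  intro values targets _
  exact pv_main values targets
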